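-- pv_equiv track=rewrite | github.com/mirrosha26/fa-algoritmic | H31.py | sum_dct
-- ===== SOURCE A (Python) =====
-- def sum_dct(dicts):
--     return_dict = {}
--     go_dicts = dicts[:]
--     for a_dict in go_dicts:
--             for key, value in a_dict.items():
--                 value_sum = value
--                 for b_dict in go_dicts:
--                     if b_dict != a_dict:
--                         if key in b_dict:
--                                 value_sum += b_dict[key]
--                 return_dict.setdefault(key, value_sum)
--     return return_dict
-- ===== SOURCE B (Python) =====
-- def sum_dct(dicts):
--     totals = {}
--     for d in dicts:
--         for k, v in d.items():
--             totals[k] = totals.get(k, 0) + v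
--     return totals
-- ===== Notes on version B (the rewrite author's own statement) =====
-- stated objective: faster
-- what changed: A rescans every other dict for every key of every dict (content-comparing whole dicts each time); B is one pass accumulating per-key totals in a single dict.
-- intended difference: On lists where the first dict containing some key has a content-equal duplicate elsewhere and a nonzero value at that key, A under-counts (its 'b_dict != a_dict' guard, meant to skip the current dict itself, also skips every content-equal dict, e.g. A([{'a':1},{'a':1}]) = {'a':1}), while B returns the true per-key sum over all dicts ({'a':2}), which is the intended value. — e.g. on sum_dct([[("a", 1)], [("a", 1)]]): A returns [("a", 1)], B returns [("a", 2)]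
import Mathlib
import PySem

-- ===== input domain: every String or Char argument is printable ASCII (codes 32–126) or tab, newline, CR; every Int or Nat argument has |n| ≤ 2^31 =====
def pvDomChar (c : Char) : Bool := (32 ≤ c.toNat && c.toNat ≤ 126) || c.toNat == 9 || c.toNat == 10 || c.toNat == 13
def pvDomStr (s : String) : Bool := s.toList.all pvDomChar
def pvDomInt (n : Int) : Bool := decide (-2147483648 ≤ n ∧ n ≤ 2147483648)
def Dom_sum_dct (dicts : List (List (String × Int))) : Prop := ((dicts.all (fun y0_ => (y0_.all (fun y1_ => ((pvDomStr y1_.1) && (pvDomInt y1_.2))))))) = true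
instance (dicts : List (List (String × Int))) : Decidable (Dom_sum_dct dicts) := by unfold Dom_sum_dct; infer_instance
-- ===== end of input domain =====

-- B replaces A's quadratic rescans by one pass accumulating per-key totals; A's '!=' guard
-- also skips content-equal duplicates, an evident bug stated as the intended difference D_.

-- ===== PORT A =====
-- Python's 'b_dict != a_dict' compares dicts by content, ignoring order: same keys, same values.
def pyDictEq (a b : List (String × Int)) : Bool :=
  a.all (fun p => (PySem.Dict.mk b).get? p.1 == some p.2) &&
  b.all (fun p => (PySem.Dict.mk a).get? p.1 == some p.2)

def sum_dct (dicts : List (List (String × Int))) : List (String × Int) :=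
  let go_dicts := dicts      -- go_dicts = dicts[:]
  (go_dicts.foldl (fun return_dict a_dict =>
      a_dict.foldl (fun return_dict kv =>
        let value_sum := go_dicts.foldl (fun s b_dict =>
            if pyDictEq b_dict a_dict then s
            else if (PySem.Dict.mk b_dict).contains kv.1 then
              s + (PySem.Dict.mk b_dict).getD kv.1 0
            else s) kv.2
        return_dict.setdefault kv.1 value_sum) return_dict)
    PySem.Dict.empty).items

-- ===== PORT B =====
def sum_dct_alt (dicts : List (List (String × Int))) : List (String × Int) :=
  (dicts.foldl (fun totals d =>
      d.foldl (fun totals kv => totals.insert kv.1 (totals.getD kv.1 0 + kv.2)) totals)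
    (PySem.Dict.empty : PySem.Dict String Int)).items

-- ===== PRECONDITION & SPEC =====
-- Pre_: each inner association list encodes a Python dict, whose keys are necessarily distinct;
-- a duplicate-key list corresponds to no Python input at all (the dict constructor collapses it).
def Pre_sum_dct (dicts : List (List (String × Int))) : Prop :=
  ∀ d ∈ dicts, (d.map Prod.fst).Nodup
instance (dicts : List (List (String × Int))) : Decidable (Pre_sum_dct dicts) := by
  unfold Pre_sum_dct; infer_instance

def pvWitness_sum_dct : (List (List (String × Int))) :=
  [[("a", 1), ("b", 2)], [("b", 2), ("a", 1)], [("c", 5)]]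

-- On lists where the first dict containing some key has a content-equal duplicate elsewhere and a
-- nonzero value at that key, A under-counts that key (its 'b_dict != a_dict' guard, meant to skip
-- the current dict itself, also skips every content-equal dict), while B returns the true per-key
-- sum over all dicts, which is the intended value.
def D_sum_dct (dicts : List (List (String × Int))) : Prop :=
  ∃ d ∈ dicts, ∃ kv ∈ d,
    dicts.find? (fun b => b.any (fun p => p.1 == kv.1)) = some d ∧
    kv.2 ≠ 0 ∧ 2 ≤ dicts.countP (fun b => decide (b.Perm d))
instance (dicts : List (List (String × Int))) : Decidable (D_sum_dct dicts) := by
  unfold D_sum_dct; infer_instance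

def Spec_sum_dct (dicts : List (List (String × Int))) (out : List (String × Int)) : Prop :=
  ¬ D_sum_dct dicts → out = sum_dct_alt dicts
instance (dicts : List (List (String × Int))) (out : List (String × Int)) : Decidable (Spec_sum_dct dicts out) := by unfold Spec_sum_dct; infer_instance

def pvDiffWitness_sum_dct : (List (List (String × Int))) := [[("a", 1)], [("a", 1)]]
def pvDiffWitnessOut_sum_dct : (List (String × Int)) × (List (String × Int)) :=
  ([("a", 1)], [("a", 2)])

-- ===== CLAIM (what is proved, stated in full; the proofs are below) =====
def Claim_unchanged_sum_dct : Prop := ∀ (dicts : List (List (String × Int))), Dom_sum_dct dicts → Pre_sum_dct dicts → Spec_sum_dct dicts (sum_dct dicts)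
def Claim_changed_sum_dct : Prop := Dom_sum_dct (pvDiffWitness_sum_dct) ∧ Pre_sum_dct (pvDiffWitness_sum_dct) ∧ D_sum_dct (pvDiffWitness_sum_dct) ∧ sum_dct (pvDiffWitness_sum_dct) = pvDiffWitnessOut_sum_dct.1 ∧ sum_dct_alt (pvDiffWitness_sum_dct) = pvDiffWitnessOut_sum_dct.2 ∧ pvDiffWitnessOut_sum_dct.1 ≠ pvDiffWitnessOut_sum_dct.2
def Claim_exact_sum_dct : Prop := ∀ (dicts : List (List (String × Int))), Dom_sum_dct dicts → Pre_sum_dct dicts → D_sum_dct dicts → sum_dct dicts ≠ sum_dct_alt dicts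

-- ===== LEMMAS AND PROOFS =====

-- occurrence list: every (dict, key, value) triple, in traversal order
def pvOccs (L : List (List (String × Int))) : List ((List (String × Int)) × String × Int) :=
  L.flatMap (fun a => a.map (fun kv => (a, kv.1, kv.2)))

-- A's inner loop as a function
def pvValA (L : List (List (String × Int))) (a : List (String × Int)) (k : String) (v : Int) : Int :=
  L.foldl (fun s b_dict =>
    if pyDictEq b_dict a then s
    else if (PySem.Dict.mk b_dict).contains k then s + (PySem.Dict.mk b_dict).getD k 0
    else s) v

def pvQA (L : List (List (String × Int))) : List (String × Int) :=
  (pvOccs L).map (fun o => (o.2.1, pvValA L o.1 o.2.1 o.2.2))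

def pvFlat (L : List (List (String × Int))) : List (String × Int) :=
  (pvOccs L).map (fun o => o.2)

def dictSig (d : List (String × Int)) : List (String × Int) :=
  PySem.List.sorted d (fun p => p.1) false

-- the first-occurrence key set, the per-key total, the duplicate count, and A's per-key value
def pvK (L : List (List (String × Int))) : List String :=
  PySem.Set.ofList ((pvOccs L).map (fun o => o.2.1))

def pvTot (L : List (List (String × Int))) (k : String) : Int :=
  (((pvFlat L).filter (fun p => p.1 == k)).map (·.2)).sum

def pvCnt (L : List (List (String × Int))) (a : List (String × Int)) : Int :=
  (L.countP (fun b => decide (b.Perm a)) : Int)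

def pvFA (L : List (List (String × Int))) (k : String) : Int :=
  ((pvOccs L).find? (fun o => o.2.1 == k)).elim 0
    (fun o => pvTot L k - (pvCnt L o.1 - 1) * o.2.2)

theorem pv_get?_setfold {ν : Type} (Q : List (String × ν)) (r : PySem.Dict String ν) (k : String) :
    (Q.foldl (fun r p => r.setdefault p.1 p.2) r).get? k =
      (r.get? k).or ((Q.find? (fun p => p.1 == k)).map (·.2)) := by
  induction Q generalizing r with
  | nil => simp
  | cons p Q ih =>
    simp only [List.foldl_cons, ih, List.find?_cons]
    by_cases hk : p.1 = k
    · subst hk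
      rw [PySem.Dict.get?_setdefault_self]
      cases r.get? p.1 <;> simp
    · rw [PySem.Dict.get?_setdefault_of_ne _ _ (fun h => hk h.symm)]
      have : (p.1 == k) = false := by simpa using hk
      simp [this]

theorem pv_keys_setfold {ν : Type} (Q : List (String × ν)) (r : PySem.Dict String ν) :
    (Q.foldl (fun r p => r.setdefault p.1 p.2) r).keys =
      PySem.Set.update r.keys (Q.map (·.1)) := by
  induction Q generalizing r with
  | nil => simp [PySem.Set.update]
  | cons p Q ih =>
    simp only [List.foldl_cons, ih, List.map_cons, PySem.Set.update_cons]
    congr 1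
    rw [PySem.Dict.keys_setdefault]
    rw [PySem.Set.add_eq_ite]
    by_cases h : p.1 ∈ r.keys
    · simp [h, (PySem.Dict.contains_iff_mem_keys _ _).mpr h]
    · have : r.contains p.1 ≠ true := fun hc => h ((PySem.Dict.contains_iff_mem_keys _ _).mp hc)
      simp [h, this]

theorem pv_getD_foldT (Q : List (String × Int)) (t : PySem.Dict String Int) (k : String) :
    (Q.foldl (fun t p => t.insert p.1 (t.getD p.1 0 + p.2)) t).getD k 0 =
      t.getD k 0 + ((Q.filter (fun p => p.1 == k)).map (·.2)).sum := by
  induction Q generalizing t with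
  | nil => simp
  | cons p Q ih =>
    simp only [List.foldl_cons, ih, List.filter_cons]
    by_cases hk : p.1 = k
    · subst hk
      simp
      ring
    · rw [PySem.Dict.getD_insert]
      simp [hk, Ne.symm hk]

theorem pv_foldl_add (L : List (List (String × Int))) (w : List (String × Int) → Int) (v : Int) :
    L.foldl (fun s b => s + w b) v = v + (L.map w).sum := by
  induction L generalizing v with
  | nil => simp
  | cons b L ih => simp [ih]; ring

theorem pv_get?_of_mem {b : List (String × Int)} {k : String} {v : Int}
    (hb : (b.map Prod.fst).Nodup) (h : (k, v) ∈ b) : (PySem.Dict.mk b).get? k = some v := by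
  have hkeys : (PySem.Dict.mk b).keys.Nodup := by simpa [PySem.Dict.keys] using hb
  exact (PySem.Dict.get?_eq_some_iff_mem_items _ _ _ hkeys).mpr h

theorem pv_perm_of_sig {a b : List (String × Int)} (h : dictSig b = dictSig a) : b.Perm a := by
  have h1 := PySem.List.sorted_perm b (fun p => p.1) false
  have h2 := PySem.List.sorted_perm a (fun p => p.1) false
  unfold dictSig at h
  exact (h1.symm.trans (h ▸ h2 : (PySem.List.sorted b (fun p => p.1) false).Perm a))

theorem pv_sig_of_perm {a b : List (String × Int)} (ha : (a.map Prod.fst).Nodup)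
    (h : b.Perm a) : dictSig b = dictSig a := by
  unfold dictSig
  apply PySem.List.sorted_eq_of_perm_of_pairwise_lt
  · exact (PySem.List.sorted_perm a (fun p => p.1) false).trans h.symm
  · have hperm := PySem.List.sorted_perm a (fun p => p.1) false
    have hnd : ((PySem.List.sorted a (fun p => p.1) false).map Prod.fst).Nodup :=
      ((hperm.map Prod.fst).nodup_iff).mpr ha
    have hle := PySem.List.sorted_pairwise a (fun p => p.1)
    have hne : (PySem.List.sorted a (fun p => p.1) false).Pairwise (fun p q => p.1 ≠ q.1) := by
      have := hnd
      rw [List.Nodup, List.pairwise_map] at this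
      exact this
    exact (hle.and hne).imp (fun h => lt_of_le_of_ne h.1 h.2)

theorem pv_pyDictEq_of_perm {a b : List (String × Int)} (ha : (a.map Prod.fst).Nodup)
    (hb : (b.map Prod.fst).Nodup) (h : b.Perm a) : pyDictEq b a = true := by
  unfold pyDictEq
  rw [Bool.and_eq_true, List.all_eq_true, List.all_eq_true]
  constructor
  · intro p hp
    have : (p.1, p.2) ∈ a := by simpa using h.subset (by simpa using hp)
    simp [pv_get?_of_mem ha this]
  · intro p hp
    have : (p.1, p.2) ∈ b := by simpa using h.symm.subset (by simpa using hp)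
    simp [pv_get?_of_mem hb this]

theorem pv_perm_of_pyDictEq {a b : List (String × Int)} (ha : (a.map Prod.fst).Nodup)
    (hb : (b.map Prod.fst).Nodup) (h : pyDictEq b a = true) : b.Perm a := by
  unfold pyDictEq at h
  rw [Bool.and_eq_true, List.all_eq_true, List.all_eq_true] at h
  obtain ⟨h1, h2⟩ := h
  rw [List.perm_ext_iff_of_nodup (hb.of_map _) (ha.of_map _)]
  intro p
  constructor
  · intro hp
    have := h1 p hp
    rw [beq_iff_eq] at this
    have hkeys : (PySem.Dict.mk a).keys.Nodup := by simpa [PySem.Dict.keys] using ha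
    have := (PySem.Dict.get?_eq_some_iff_mem_items _ _ _ hkeys).mp this
    simpa using this
  · intro hp
    have := h2 p hp
    rw [beq_iff_eq] at this
    have hkeys : (PySem.Dict.mk b).keys.Nodup := by simpa [PySem.Dict.keys] using hb
    have := (PySem.Dict.get?_eq_some_iff_mem_items _ _ _ hkeys).mp this
    simpa using this

theorem pv_filter_key {b : List (String × Int)} {k : String} (hb : (b.map Prod.fst).Nodup) :
    b.filter (fun p => p.1 == k) =
      ((PySem.Dict.mk b).get? k).elim [] (fun w => [(k, w)]) := by
  induction b with
  | nil => simp [PySem.Dict.get?]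
  | cons p rest ih =>
    simp only [List.map_cons, List.nodup_cons] at hb
    obtain ⟨hp, hrest⟩ := hb
    rw [List.filter_cons, PySem.Dict.get?_mk_cons]
    by_cases hk : p.1 = k
    · subst hk
      have hempty : rest.filter (fun q => q.1 == p.1) = [] := by
        rw [List.filter_eq_nil_iff]
        intro q hq
        simp only [beq_iff_eq]
        exact fun hqe => hp (hqe ▸ List.mem_map_of_mem hq)
      simp [hempty]
    · have : (p.1 == k) = false := by simpa using hk
      simp [this, ih hrest]

theorem pv_pointwise {a b : List (String × Int)} {k : String} {v : Int}
    (ha : (a.map Prod.fst).Nodup) (hb : (b.map Prod.fst).Nodup) (hkv : (k, v) ∈ a) :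
    ((b.filter (fun p => p.1 == k)).map (·.2)).sum =
      (if pyDictEq b a then 0 else if (PySem.Dict.mk b).contains k then (PySem.Dict.mk b).getD k 0 else 0)
        + (if dictSig b = dictSig a then 1 else 0) * v := by
  rw [pv_filter_key hb]
  by_cases hsig : dictSig b = dictSig a
  · have hperm := pv_perm_of_sig hsig
    have heq := pv_pyDictEq_of_perm ha hb hperm
    have hmem : (k, v) ∈ b := hperm.symm.subset hkv
    rw [pv_get?_of_mem hb hmem]
    simp [heq, hsig]
  · have heq : pyDictEq b a = false := by
      by_contra hne
      exact hsig (pv_sig_of_perm ha (pv_perm_of_pyDictEq ha hb (by simpa using hne)))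
    cases hg : (PySem.Dict.mk b).get? k with
    | none =>
      have hc : (PySem.Dict.mk b).contains k = false := by
        rw [PySem.Dict.contains_eq_isSome_get?, hg]; rfl
      simp [heq, hsig, hc]
    | some w =>
      have hc : (PySem.Dict.mk b).contains k = true := by
        rw [PySem.Dict.contains_eq_isSome_get?, hg]; rfl
      have hd : (PySem.Dict.mk b).getD k 0 = w := PySem.Dict.getD_of_get?_eq_some _ _ hg
      simp [heq, hsig, hc, hd]

theorem pv_count_sum (L : List (List (String × Int))) (a : List (String × Int)) :
    (L.map (fun b => if dictSig b = dictSig a then (1 : Int) else 0)).sum =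
      ((L.map dictSig).count (dictSig a) : Int) := by
  induction L with
  | nil => simp
  | cons b L ih =>
    simp only [List.map_cons, List.sum_cons, List.count_cons, ih]
    by_cases h : dictSig b = dictSig a
    · simp [h]; ring
    · simp [h]

theorem pv_flat_sum (L : List (List (String × Int))) (k : String) :
    (((pvFlat L).filter (fun p => p.1 == k)).map (·.2)).sum
      = (L.map (fun b => ((b.filter (fun p => p.1 == k)).map (·.2)).sum)).sum := by
  unfold pvFlat pvOccs
  induction L with
  | nil => simp
  | cons b L ih => simp [ih]

theorem pv_sum_split (L : List (List (String × Int))) (f g : List (String × Int) → Int) (v : Int) :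
    (L.map (fun b => f b + g b * v)).sum = (L.map f).sum + (L.map g).sum * v := by
  induction L with
  | nil => simp
  | cons b L ih => simp [ih]; ring

-- the duplicate count via sorted signatures equals the permutation count
theorem pv_cnt_sig (L : List (List (String × Int))) {a : List (String × Int)}
    (ha : (a.map Prod.fst).Nodup) :
    ((L.map dictSig).count (dictSig a) : Int) = pvCnt L a := by
  unfold pvCnt
  induction L with
  | nil => simp
  | cons b L ih =>
    simp only [List.map_cons, List.count_cons, List.countP_cons]
    by_cases h : b.Perm a
    · have hs : dictSig b = dictSig a := pv_sig_of_perm ha h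
      simp [h, hs, ← ih]
    · have hs : dictSig b ≠ dictSig a := fun hsig => h (pv_perm_of_sig hsig)
      have : (dictSig b == dictSig a) = false := by simpa using hs
      simp [h, this, ← ih]

theorem pv_core (L : List (List (String × Int))) (hPre : ∀ d ∈ L, (d.map Prod.fst).Nodup)
    (a : List (String × Int)) (ha : a ∈ L) (k : String) (v : Int) (hkv : (k, v) ∈ a) :
    pvValA L a k v = pvTot L k - (pvCnt L a - 1) * v := by
  have hstep : pvValA L a k v = v + (L.map (fun b =>
      if pyDictEq b a then 0
      else if (PySem.Dict.mk b).contains k then (PySem.Dict.mk b).getD k 0 else 0)).sum := by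
    unfold pvValA
    rw [show (fun (s : Int) b_dict =>
        if pyDictEq b_dict a then s
        else if (PySem.Dict.mk b_dict).contains k then s + (PySem.Dict.mk b_dict).getD k 0
        else s) = (fun (s : Int) b => s + (if pyDictEq b a then 0
        else if (PySem.Dict.mk b).contains k then (PySem.Dict.mk b).getD k 0 else 0)) from by
      funext s b
      split_ifs <;> ring]
    exact pv_foldl_add L _ v
  have htot : pvTot L k =
      (L.map (fun b => ((b.filter (fun p => p.1 == k)).map (·.2)).sum)).sum := pv_flat_sum L k
  rw [hstep, ← pv_cnt_sig L (hPre a ha), ← pv_count_sum L a]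
  rw [htot, List.map_congr_left (fun b hbL => pv_pointwise (hPre a ha) (hPre b hbL) hkv)]
  rw [pv_sum_split]
  ring

theorem pv_foldl_congr {α β : Type} (l : List α) (f g : β → α → β) (b : β)
    (h : ∀ acc, ∀ a ∈ l, f acc a = g acc a) : l.foldl f b = l.foldl g b := by
  induction l generalizing b with
  | nil => rfl
  | cons x l ih => simp only [List.foldl_cons, h b x (by simp)]; exact ih _ (fun acc a ha => h acc a (by simp [ha]))

theorem pv_A_eq (L : List (List (String × Int))) :
    sum_dct L = ((pvQA L).foldl (fun r p => r.setdefault p.1 p.2) PySem.Dict.empty).items := by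
  unfold sum_dct pvQA pvOccs pvValA
  dsimp only
  rw [List.map_flatMap, List.foldl_flatMap]
  congr 1
  apply pv_foldl_congr
  intro r a _
  rw [List.map_map, List.foldl_map]
  rfl

theorem pv_flat_eq (L : List (List (String × Int))) : pvFlat L = L.flatMap (fun a => a) := by
  unfold pvFlat pvOccs
  rw [List.map_flatMap]
  simp

theorem pv_B_eq (L : List (List (String × Int))) :
    sum_dct_alt L =
      ((pvFlat L).foldl (fun t p => t.insert p.1 (t.getD p.1 0 + p.2)) PySem.Dict.empty).items := by
  unfold sum_dct_alt
  rw [pv_flat_eq, List.foldl_flatMap]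

-- the first occurrence of a key, expressed through the first dict containing it
theorem pv_find_occ (L : List (List (String × Int))) (k : String) :
    (pvOccs L).find? (fun o => o.2.1 == k) =
      (L.find? (fun b => b.any (fun p => p.1 == k))).bind
        (fun d => (d.find? (fun p => p.1 == k)).map (fun kv => (d, kv.1, kv.2))) := by
  induction L with
  | nil => simp [pvOccs]
  | cons d L ih =>
    have hocc : pvOccs (d :: L) = d.map (fun kv => (d, kv.1, kv.2)) ++ pvOccs L := by
      simp [pvOccs]
    rw [hocc, List.find?_append, List.find?_map, List.find?_cons]
    have hcomp : (fun o : (List (String × Int)) × String × Int => o.2.1 == k) ∘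
        (fun kv : String × Int => (d, kv.1, kv.2)) = (fun p => p.1 == k) := rfl
    rw [hcomp]
    by_cases hany : d.any (fun p => p.1 == k)
    · obtain ⟨kv, hkvmem, hkvk⟩ := List.any_eq_true.mp hany
      have hsome : (d.find? (fun p => p.1 == k)).isSome := by
        rw [List.find?_isSome]
        exact ⟨kv, hkvmem, hkvk⟩
      obtain ⟨kv', hkv'⟩ := Option.isSome_iff_exists.mp hsome
      simp [hany, hkv']
    · have hnone : d.find? (fun p => p.1 == k) = none := by
        rw [List.find?_eq_none]
        intro p hp
        exact fun hpk => hany (List.any_eq_true.mpr ⟨p, hp, hpk⟩)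
      simp only [hany]
      rw [hnone]
      simpa using ih

-- with distinct keys, the first pair with a member's key is that member
theorem pv_find_self {d : List (String × Int)} {kv : String × Int}
    (hd : (d.map Prod.fst).Nodup) (hkv : kv ∈ d) :
    d.find? (fun p => p.1 == kv.1) = some kv := by
  induction d with
  | nil => simp at hkv
  | cons p rest ih =>
    simp only [List.map_cons, List.nodup_cons] at hd
    obtain ⟨hp, hrest⟩ := hd
    rw [List.find?_cons]
    by_cases hk : p.1 = kv.1
    · have : kv = p := by
        rcases List.mem_cons.mp hkv with h | h
        · exact h
        · exact absurd (hk ▸ List.mem_map_of_mem h : p.1 ∈ rest.map Prod.fst) hp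
      simp [hk, this]
    · have hb : (p.1 == kv.1) = false := by simpa using hk
      have hmem : kv ∈ rest := by
        rcases List.mem_cons.mp hkv with h | h
        · exact absurd (congrArg Prod.fst h).symm hk
        · exact h
      simp [hb, ih hrest hmem]

-- A's result as a map over the first-occurrence key set
theorem pv_A_char (L : List (List (String × Int))) (hPre : ∀ d ∈ L, (d.map Prod.fst).Nodup) :
    sum_dct L = (pvK L).map (fun k => (k, pvFA L k)) := by
  rw [pv_A_eq]
  have hkeysA : ((pvQA L).foldl (fun r p => r.setdefault p.1 p.2) PySem.Dict.empty).keys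
      = pvK L := by
    rw [pv_keys_setfold]
    simp [pvK, PySem.Set.update_nil_left, pvQA, List.map_map, Function.comp_def]
  have hndA : ((pvQA L).foldl (fun r p => r.setdefault p.1 p.2) PySem.Dict.empty).keys.Nodup := by
    rw [hkeysA]; exact PySem.Set.nodup_ofList _
  rw [PySem.Dict.items_eq_map_keys _ hndA 0, hkeysA]
  apply List.map_congr_left
  intro k hkK
  have hkocc : k ∈ (pvOccs L).map (fun o => o.2.1) := (PySem.Set.mem_ofList _ _).mp hkK
  have hfind : ((pvOccs L).find? (fun o => o.2.1 == k)).isSome = true := by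
    rw [List.find?_isSome]
    obtain ⟨o, ho, hoe⟩ := List.mem_map.mp hkocc
    exact ⟨o, ho, by simpa using hoe⟩
  obtain ⟨o, ho⟩ := Option.isSome_iff_exists.mp hfind
  have homem : o ∈ pvOccs L := List.mem_of_find?_eq_some ho
  have hok : o.2.1 = k := by simpa using List.find?_some ho
  obtain ⟨a, haL, hoa⟩ := List.mem_flatMap.mp homem
  obtain ⟨kv, hkva, hkveq⟩ := List.mem_map.mp hoa
  have ho1 : o.1 = a := by rw [← hkveq]
  have hkv' : (k, o.2.2) ∈ o.1 := by
    rw [ho1]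
    have hmm : (o.2.1, o.2.2) ∈ a := by rw [← hkveq]; simpa using hkva
    rwa [hok] at hmm
  have hA : ((pvQA L).foldl (fun r p => r.setdefault p.1 p.2) PySem.Dict.empty).getD k 0
      = pvValA L o.1 o.2.1 o.2.2 := by
    rw [PySem.Dict.getD_eq_get?_getD, pv_get?_setfold, PySem.Dict.get?_empty, Option.none_or]
    unfold pvQA
    rw [List.find?_map]
    have hfe : (pvOccs L).find? ((fun p => p.1 == k) ∘ (fun o => (o.2.1, pvValA L o.1 o.2.1 o.2.2)))
        = some o := ho
    rw [hfe]
    rfl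
  rw [hA, pv_core L hPre o.1 (ho1 ▸ haL) o.2.1 o.2.2 (hok ▸ hkv')]
  unfold pvFA
  rw [ho]
  simp [hok]

-- B's result as a map over the same key set
theorem pv_B_char (L : List (List (String × Int))) :
    sum_dct_alt L = (pvK L).map (fun k => (k, pvTot L k)) := by
  rw [pv_B_eq]
  have hkeysT : ((pvFlat L).foldl (fun t p => t.insert p.1 (t.getD p.1 0 + p.2)) PySem.Dict.empty).keys
      = pvK L := by
    rw [PySem.Dict.keys_foldl_insert_key (pvFlat L) (fun p => p.1)
      (fun t p => t.getD p.1 0 + p.2) PySem.Dict.empty]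
    simp [pvK, PySem.Set.update_nil_left, pvFlat, List.map_map, Function.comp_def]
  have hndT : ((pvFlat L).foldl (fun t p => t.insert p.1 (t.getD p.1 0 + p.2)) PySem.Dict.empty).keys.Nodup := by
    rw [hkeysT]; exact PySem.Set.nodup_ofList _
  rw [PySem.Dict.items_eq_map_keys _ hndT 0, hkeysT]
  apply List.map_congr_left
  intro k _
  rw [pv_getD_foldT]
  simp [pvTot]

-- the dicts of L have at least one permutation-copy of any member
theorem pv_cnt_pos (L : List (List (String × Int))) {a : List (String × Int)} (ha : a ∈ L) :
    1 ≤ pvCnt L a := by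
  unfold pvCnt
  have : 0 < L.countP (fun b => decide (b.Perm a)) :=
    List.countP_pos_iff.mpr ⟨a, ha, by simp⟩
  omega

-- per-key agreement/disagreement, decided by the first occurrence
theorem pv_diff_iff (L : List (List (String × Int))) {k : String}
    {o : (List (String × Int)) × String × Int}
    (ho : (pvOccs L).find? (fun o => o.2.1 == k) = some o) :
    (pvFA L k = pvTot L k ↔ (o.2.2 = 0 ∨ pvCnt L o.1 < 2)) := by
  have homem : o ∈ pvOccs L := List.mem_of_find?_eq_some ho
  obtain ⟨a, haL, hoa⟩ := List.mem_flatMap.mp homem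
  have ho1 : o.1 ∈ L := by
    obtain ⟨kv, _, hkveq⟩ := List.mem_map.mp hoa
    rw [show o.1 = a from by rw [← hkveq]]
    exact haL
  have hpos := pv_cnt_pos L ho1
  unfold pvFA
  rw [ho]
  simp only [Option.elim_some]
  constructor
  · intro h
    have h0 : (pvCnt L o.1 - 1) * o.2.2 = 0 := by omega
    rcases mul_eq_zero.mp h0 with h1 | h2
    · right; omega
    · left; exact h2
  · intro h
    rcases h with h | h
    · rw [h]; ring
    · have h1 : pvCnt L o.1 - 1 = 0 := by omega
      rw [h1]; ring

-- ===== VERDICT (by name: the statement is the Claim_ definition above) =====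
theorem sum_dct_spec : Claim_unchanged_sum_dct := by
  unfold Claim_unchanged_sum_dct Spec_sum_dct
  intro L _hDom hPre hnD
  rw [pv_A_char L hPre, pv_B_char L]
  apply List.map_congr_left
  intro k hkK
  have hkocc : k ∈ (pvOccs L).map (fun o => o.2.1) := (PySem.Set.mem_ofList _ _).mp hkK
  have hfind : ((pvOccs L).find? (fun o => o.2.1 == k)).isSome = true := by
    rw [List.find?_isSome]
    obtain ⟨o, ho, hoe⟩ := List.mem_map.mp hkocc
    exact ⟨o, ho, by simpa using hoe⟩
  obtain ⟨o, ho⟩ := Option.isSome_iff_exists.mp hfind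
  have hbridge := pv_find_occ L k
  rw [ho] at hbridge
  cases hfd : L.find? (fun b => b.any (fun p => p.1 == k)) with
  | none => rw [hfd] at hbridge; simp at hbridge
  | some d =>
    rw [hfd, Option.bind_some] at hbridge
    cases hfkv : d.find? (fun p => p.1 == k) with
    | none => rw [hfkv] at hbridge; simp at hbridge
    | some kv =>
      rw [hfkv, Option.map_some] at hbridge
      have hdL : d ∈ L := List.mem_of_find?_eq_some hfd
      have hkvd : kv ∈ d := List.mem_of_find?_eq_some hfkv
      have hk1 : kv.1 = k := by simpa using List.find?_some hfkv
      have hoeq : o = (d, kv.1, kv.2) := Option.some.inj hbridge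
      have ho1 : o.1 = d := by rw [hoeq]
      have ho22 : o.2.2 = kv.2 := by rw [hoeq]
      have hcase : kv.2 = 0 ∨ pvCnt L d < 2 := by
        by_contra hcon
        push_neg at hcon
        refine hnD ⟨d, hdL, kv, hkvd, by rw [hk1]; exact hfd, hcon.1, ?_⟩
        have h2 := hcon.2
        unfold pvCnt at h2
        omega
      have : pvFA L k = pvTot L k := by
        rw [pv_diff_iff L ho, ho1, ho22]
        exact hcase
      rw [this]

theorem sum_dct_changed : Claim_changed_sum_dct := by
  unfold Claim_changed_sum_dct; decide

theorem sum_dct_tight : Claim_exact_sum_dct := by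
  unfold Claim_exact_sum_dct
  intro L _hDom hPre hD heq
  obtain ⟨d, hdL, kv, hkvd, hfd, hv, hc⟩ := hD
  have hfkv : d.find? (fun p => p.1 == kv.1) = some kv := pv_find_self (hPre d hdL) hkvd
  have ho : (pvOccs L).find? (fun o => o.2.1 == kv.1) = some (d, kv.1, kv.2) := by
    rw [pv_find_occ L kv.1, hfd, Option.bind_some, hfkv, Option.map_some]
  have hkK : kv.1 ∈ pvK L := by
    apply (PySem.Set.mem_ofList _ _).mpr
    apply List.mem_map.mpr
    refine ⟨(d, kv.1, kv.2), ?_, rfl⟩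
    unfold pvOccs
    exact List.mem_flatMap.mpr ⟨d, hdL, List.mem_map.mpr ⟨kv, hkvd, rfl⟩⟩
  rw [pv_A_char L hPre, pv_B_char L] at heq
  have hpt := (List.map_inj_left.mp heq) kv.1 hkK
  have hFA : pvFA L kv.1 = pvTot L kv.1 := congrArg Prod.snd hpt
  have := (pv_diff_iff L ho).mp hFA
  simp only at this
  rcases this with h | h
  · exact hv h
  · have hc' : (2 : Int) ≤ pvCnt L d := by unfold pvCnt; exact_mod_cast hc
    omega
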